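-- pv_equiv track=rewrite | github.com/PunchArm255/1337_CC | Rank02/A-Maze-Ing/helpers/visualizer.py | get_path_coordinates
-- ===== SOURCE A (Python) =====
-- from typing import Tuple, List, Any
--
-- def get_path_coordinates(entry: Tuple[int, int],
--                          path_str: str) -> List[Tuple[int, int]]:
--     """Convert a path string into a list of coordinate tuples.
--
--     Takes a starting position and a string of directional moves (N, S, E, W)
--     and returns the complete list of coordinates visited along the path.
--
--     Args:
--         entry: Starting coordinate as (row, col) tuple.
--         path_str: String of directional moves, e.g., "NNESSW".
--
--     Returns:
--         List of (row, col) tuples representing each position in the path,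
--         including the starting position.
--     """
--     coords = []
--     curr_y, curr_x = entry
--     coords.append((curr_y, curr_x))
--     for move in path_str:
--         if move == "N":
--             curr_y -= 1
--         elif move == "S":
--             curr_y += 1
--         elif move == "E":
--             curr_x += 1
--         elif move == "W":
--             curr_x -= 1
--         coords.append((curr_y, curr_x))
--     return coords
-- ===== SOURCE B (Python) =====
-- from typing import Tuple, List
--
-- def _axis_track(start: int, path_str: str, inc: str, dec: str) -> List[int]:
--     """Running positions along one axis: +1 on inc, -1 on dec, 0 otherwise."""
--     track = [start]
--     v = start
--     for m in path_str:
--         v += (m == inc) - (m == dec)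
--         track.append(v)
--     return track
--
-- def get_path_coordinates(entry: Tuple[int, int],
--                          path_str: str) -> List[Tuple[int, int]]:
--     """Axis-separated decomposition: the row track (S=+1, N=-1) and the
--     column track (E=+1, W=-1) are computed independently and zipped."""
--     curr_y, curr_x = entry
--     return list(zip(_axis_track(curr_y, path_str, "S", "N"),
--                     _axis_track(curr_x, path_str, "E", "W")))
-- ===== Notes on version B (the rewrite author's own statement) =====
-- stated objective: alternative
-- what changed: B decomposes the problem by axis: it computes the row positions and the column positions in two independent one-axis prefix-sum passes (S/N affect only rows, E/W only columns, via boolean arithmetic instead of an if/elif chain) and zips the two tracks, instead of A's single loop threading a combined (y, x) state.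
import Mathlib
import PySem

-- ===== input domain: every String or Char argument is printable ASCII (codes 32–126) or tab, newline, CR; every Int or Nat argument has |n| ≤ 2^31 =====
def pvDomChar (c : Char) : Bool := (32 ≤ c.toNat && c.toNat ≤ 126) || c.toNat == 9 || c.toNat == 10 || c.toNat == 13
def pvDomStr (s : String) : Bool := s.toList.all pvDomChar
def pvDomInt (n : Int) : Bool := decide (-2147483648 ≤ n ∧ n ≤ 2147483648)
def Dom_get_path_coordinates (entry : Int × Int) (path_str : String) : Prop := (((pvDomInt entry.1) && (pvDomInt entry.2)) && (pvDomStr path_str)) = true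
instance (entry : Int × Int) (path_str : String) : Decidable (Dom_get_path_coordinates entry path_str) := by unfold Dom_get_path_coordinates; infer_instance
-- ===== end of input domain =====

-- B splits the work by axis: two independent one-axis prefix-sum passes (rows, columns) zipped, instead of A's single loop over a combined (y, x) state (alternative decomposition, same cost).

-- ===== PORT A =====
-- state: ((curr_y, curr_x), coords); each iteration updates the position by the if/elif chain and appends it
def pvAStep (st : (Int × Int) × List (Int × Int)) (move : Char) : (Int × Int) × List (Int × Int) :=
  let y := st.1.1
  let x := st.1.2
  let p : Int × Int :=
    if move = 'N' then (y - 1, x)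
    else if move = 'S' then (y + 1, x)
    else if move = 'E' then (y, x + 1)
    else if move = 'W' then (y, x - 1)
    else (y, x)
  (p, st.2 ++ [p])

def get_path_coordinates (entry : Int × Int) (path_str : String) : List (Int × Int) :=
  (path_str.toList.foldl pvAStep (entry, [entry])).2

-- ===== PORT B =====
-- the loop body of _axis_track: v += (m == inc) - (m == dec); track.append(v)
def pvAxisStep (inc dec : Char) (st : Int × List Int) (m : Char) : Int × List Int :=
  let v := st.1 + ((if m = inc then (1 : Int) else 0) - (if m = dec then (1 : Int) else 0))
  (v, st.2 ++ [v])

-- _axis_track(start, path_str, inc, dec)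
def pvAxisTrack (start : Int) (path_str : String) (inc dec : Char) : List Int :=
  (path_str.toList.foldl (pvAxisStep inc dec) (start, [start])).2

def get_path_coordinates_alt (entry : Int × Int) (path_str : String) : List (Int × Int) :=
  List.zip (pvAxisTrack entry.1 path_str 'S' 'N') (pvAxisTrack entry.2 path_str 'E' 'W')

-- ===== PRECONDITION & SPEC =====
def Spec_get_path_coordinates (entry : Int × Int) (path_str : String) (out : List (Int × Int)) : Prop := out = get_path_coordinates_alt entry path_str
instance (entry : Int × Int) (path_str : String) (out : List (Int × Int)) : Decidable (Spec_get_path_coordinates entry path_str out) := by unfold Spec_get_path_coordinates; infer_instance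

-- ===== CLAIM (what is proved, stated in full; the proofs are below) =====
def Claim_equal_get_path_coordinates : Prop := ∀ (entry : Int × Int) (path_str : String), Dom_get_path_coordinates entry path_str → Spec_get_path_coordinates entry path_str (get_path_coordinates entry path_str)

-- ===== LEMMAS AND PROOFS =====

-- the per-axis deltas
def pvDy (c : Char) : Int := (if c = 'S' then 1 else 0) - (if c = 'N' then 1 else 0)
def pvDx (c : Char) : Int := (if c = 'E' then 1 else 0) - (if c = 'W' then 1 else 0)

-- the sequence of positions along one axis
def pvTrack (d : Char → Int) : Int → List Char → List Int
  | _, [] => []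
  | v, c :: r => (v + d c) :: pvTrack d (v + d c) r

-- A's per-move position update is componentwise "add pvDy / pvDx"
lemma pvAStep_eq (st : (Int × Int) × List (Int × Int)) (c : Char) :
    pvAStep st c = ((st.1.1 + pvDy c, st.1.2 + pvDx c),
      st.2 ++ [(st.1.1 + pvDy c, st.1.2 + pvDx c)]) := by
  simp only [pvAStep, pvDy, pvDx]
  split_ifs <;> simp_all <;> ring_nf

-- A's fold appends the zip of the two tracks
lemma pvA_fold (cs : List Char) : ∀ (y x : Int) (acc : List (Int × Int)),
    (cs.foldl pvAStep ((y, x), acc)).2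
      = acc ++ List.zip (pvTrack pvDy y cs) (pvTrack pvDx x cs) := by
  induction cs with
  | nil => intro y x acc; simp [pvTrack]
  | cons c r ih =>
    intro y x acc
    simp only [List.foldl_cons, pvAStep_eq, pvTrack, List.zip_cons_cons]
    rw [ih]; simp

-- B's one-axis fold appends the axis track
lemma pvAxis_fold (inc dec : Char) (cs : List Char) :
    ∀ (v : Int) (acc : List Int),
      (cs.foldl (pvAxisStep inc dec) (v, acc)).2
        = acc ++ pvTrack (fun c => (if c = inc then (1 : Int) else 0) - (if c = dec then 1 else 0)) v cs := by
  induction cs with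
  | nil => intro v acc; simp [pvTrack]
  | cons c r ih =>
    intro v acc
    simp only [List.foldl_cons, pvAxisStep, pvTrack]
    rw [ih]; simp

-- ===== VERDICT (by name: the statement is the Claim_ definition above) =====
theorem get_path_coordinates_spec : Claim_equal_get_path_coordinates := by
  intro entry path_str _
  unfold Spec_get_path_coordinates get_path_coordinates get_path_coordinates_alt pvAxisTrack
  rw [show entry = (entry.1, entry.2) from rfl, pvA_fold, pvAxis_fold, pvAxis_fold]
  show (entry.1, entry.2) :: _ = List.zip (entry.1 :: _) (entry.2 :: _)
  rw [List.zip_cons_cons]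
  rfl
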